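-- pv_equiv track=rewrite | github.com/Shiqan/spotify-codes | spotify_codes/encoder.py | _convolutional_encode
-- ===== SOURCE A (Python) =====
-- from typing import List
--
-- def _convolutional_encode(
--     bits: List[int], polynomial: List[int]
-- ) -> List[int]:
--     """
--     Convolutionally encode data using the given generator polynomial.
--
--     Uses tail biting: prepend the last (len(poly)-1) bits to the data
--     instead of padding with zeros.
--     """
--     tail = bits[-(len(polynomial) - 1) :]
--
--     full = tail + bits
--     parity_bits = []
--
--     for i in range(len(bits)):
--         parity = 0
--         for j in range(len(polynomial)):
--             parity ^= full[i + j] * polynomial[j]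
--         parity_bits.append(parity)
--
--     return parity_bits
-- ===== SOURCE B (Python) =====
-- from typing import List
--
-- def _convolutional_encode(
--     bits: List[int], polynomial: List[int]
-- ) -> List[int]:
--     """Tail-biting convolutional encoder, scatter form: instead of gathering
--     an inner product per output position over a tail-extended buffer, XOR a
--     scaled rotation of the whole input into an accumulator once per nonzero
--     tap (zero taps contribute nothing and are skipped)."""
--     if not bits:
--         return []
--     n = len(bits)
--     k = len(polynomial)
--     acc = [0] * n
--     for j, p in enumerate(polynomial):
--         if p == 0:
--             continue
--         off = (j - (k - 1)) % n
--         rotated = bits[off:] + bits[:off]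
--         acc = [a ^ (b * p) for a, b in zip(acc, rotated)]
--     return acc
-- ===== Notes on version B (the rewrite author's own statement) =====
-- stated objective: alternative
-- what changed: B is a scatter-form encoder: instead of gathering an inner product per output over the tail-extended buffer tail+bits, it XOR-accumulates one scaled rotation bits[off:]+bits[:off] of the whole input per tap via zip, skipping zero taps entirely.
import Mathlib
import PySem

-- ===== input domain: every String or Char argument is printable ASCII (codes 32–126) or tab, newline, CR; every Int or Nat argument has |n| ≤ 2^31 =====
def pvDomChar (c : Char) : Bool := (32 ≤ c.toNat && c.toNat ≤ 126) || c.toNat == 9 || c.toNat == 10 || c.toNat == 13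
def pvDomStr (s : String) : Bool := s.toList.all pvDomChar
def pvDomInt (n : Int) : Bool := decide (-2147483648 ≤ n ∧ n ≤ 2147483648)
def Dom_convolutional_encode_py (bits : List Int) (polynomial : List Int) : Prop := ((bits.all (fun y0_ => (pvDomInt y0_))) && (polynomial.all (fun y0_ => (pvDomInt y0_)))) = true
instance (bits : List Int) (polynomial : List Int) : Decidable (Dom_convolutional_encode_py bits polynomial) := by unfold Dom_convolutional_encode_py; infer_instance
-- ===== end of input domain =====

-- B replaces A's per-output inner product over tail+bits by scatter accumulation: one scaled
-- rotation of bits XORed into the accumulator per nonzero tap (alternative decomposition).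

-- ===== PORT A =====
-- full = bits[-(len(polynomial)-1):] + bits
def pvFull (bits : List Int) (polynomial : List Int) : List Int :=
  PySem.List.slice bits (some (-((polynomial.length : Int) - 1))) none ++ bits

def convolutional_encode_py (bits : List Int) (polynomial : List Int) : List Int :=
  (List.range bits.length).foldl
    (fun (parity_bits : List Int) (i : Nat) =>
      parity_bits ++
        [(List.range polynomial.length).foldl
          (fun (parity : Int) (j : Nat) =>
            PySem.Int.bxor parity
              (PySem.List.pyGetD (pvFull bits polynomial) ((i : Int) + (j : Int)) 0 *
                PySem.List.pyGetD polynomial ((j : Int)) 0))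
          0])
    []

-- ===== PORT B =====
-- rotated = bits[off:] + bits[:off]
def pvRot (bits : List Int) (off : Int) : List Int :=
  PySem.List.slice bits (some off) none ++ PySem.List.slice bits none (some off)

-- loop body: skip zero taps, else XOR the scaled rotation in elementwise via zip
def pvStepB (bits polynomial : List Int) (acc : List Int) (jp : Int × Int) : List Int :=
  if jp.2 = 0 then acc
  else
    let off := PySem.Int.mod (jp.1 - ((polynomial.length : Int) - 1)) (bits.length : Int)
    (acc.zip (pvRot bits off)).map (fun ab => PySem.Int.bxor ab.1 (ab.2 * jp.2))

def convolutional_encode_py_alt (bits : List Int) (polynomial : List Int) : List Int :=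
  if bits = [] then []
  else
    (PySem.List.enumerate polynomial).foldl (pvStepB bits polynomial)
      (List.replicate bits.length 0)

-- ===== PRECONDITION & SPEC =====
-- Pre_ excludes exactly the inputs where A raises IndexError (non-empty bits with len(polynomial) > len(bits)+1: the tail-bitten buffer is too short there).
def Pre_convolutional_encode_py (bits : List Int) (polynomial : List Int) : Prop :=
  bits = [] ∨ polynomial.length ≤ bits.length + 1
instance (bits : List Int) (polynomial : List Int) : Decidable (Pre_convolutional_encode_py bits polynomial) := by
  unfold Pre_convolutional_encode_py; infer_instance

def pvWitness_convolutional_encode_py : List Int × List Int := ([1, 0, 1, 1], [1, 1, 1])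

def Spec_convolutional_encode_py (bits : List Int) (polynomial : List Int) (out : List Int) : Prop := out = convolutional_encode_py_alt bits polynomial
instance (bits : List Int) (polynomial : List Int) (out : List Int) : Decidable (Spec_convolutional_encode_py bits polynomial out) := by unfold Spec_convolutional_encode_py; infer_instance

-- ===== CLAIM (what is proved, stated in full; the proofs are below) =====
def Claim_equal_convolutional_encode_py : Prop := ∀ (bits : List Int) (polynomial : List Int), Dom_convolutional_encode_py bits polynomial → Pre_convolutional_encode_py bits polynomial → Spec_convolutional_encode_py bits polynomial (convolutional_encode_py bits polynomial)

-- ===== LEMMAS AND PROOFS =====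

-- The per-(i,j) term of A, and the modular-index term both sides reduce to.
def pvTermA (bits polynomial : List Int) (i j : Nat) : Int :=
  PySem.List.pyGetD (pvFull bits polynomial) ((i : Int) + (j : Int)) 0 *
    PySem.List.pyGetD polynomial ((j : Int)) 0

def pvTermB (bits polynomial : List Int) (i j : Nat) : Int :=
  PySem.List.pyGetD bits
      (PySem.Int.mod ((i : Int) + (j : Int) - ((polynomial.length : Int) - 1))
        (bits.length : Int)) 0 *
    PySem.List.pyGetD polynomial ((j : Int)) 0

-- A in map form.
theorem portA_eq_map (bits polynomial : List Int) :
    convolutional_encode_py bits polynomial =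
      (List.range bits.length).map
        (fun i => (List.range polynomial.length).foldl
          (fun parity j => PySem.Int.bxor parity (pvTermA bits polynomial i j)) 0) := by
  unfold convolutional_encode_py pvTermA
  rw [PySem.List.foldl_append_singleton_eq_map]
  rw [List.nil_append]

theorem pyGetD_int_eq_getD (xs : List Int) (a : Int) (h0 : 0 ≤ a) (h1 : a < xs.length) :
    PySem.List.pyGetD xs a 0 = xs.getD a.toNat 0 := by
  rw [PySem.List.pyGetD_eq_getElem xs 0 h0 h1, List.getD_eq_getElem _ _ (by omega)]

-- rotation lemma: (bits[off:] + bits[:off])[i] = bits[(off+i) % n]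
theorem rot_getD (bits : List Int) (off i : Nat) (hoff : off ≤ bits.length)
    (hi : i < bits.length) :
    (bits.drop off ++ bits.take off).getD i 0 =
      bits.getD ((off + i) % bits.length) 0 := by
  have hn : 0 < bits.length := by omega
  by_cases h : i < bits.length - off
  · rw [List.getD_eq_getElem?_getD, List.getElem?_append_left (by simp; omega),
      List.getElem?_drop, List.getD_eq_getElem?_getD]
    congr 2
    rw [Nat.mod_eq_of_lt (by omega)]
  · rw [List.getD_eq_getElem?_getD, List.getElem?_append_right (by simp; omega),
      List.getElem?_take, List.getD_eq_getElem?_getD]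
    have hidx : i - (bits.drop off).length = off + i - bits.length := by
      rw [List.length_drop]; omega
    have hmod : (off + i) % bits.length = off + i - bits.length := by
      rw [Nat.mod_eq_sub_mod (by omega), Nat.mod_eq_of_lt (by omega)]
    rw [hidx, hmod, if_pos (by omega)]

-- the scalar effect of one tap on position i
def pvTapScalar (bits polynomial : List Int) (i : Nat) (a : Int) (jp : Int × Int) : Int :=
  if jp.2 = 0 then a
  else PySem.Int.bxor a
    (bits.getD ((PySem.Int.mod ((i : Int) + jp.1 - ((polynomial.length : Int) - 1))
        (bits.length : Int)).toNat) 0 * jp.2)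

theorem idx_eq (bits : List Int) (hn : 0 < bits.length) (x : Int) (i : Nat)
    (hi : i < bits.length) :
    (PySem.Int.mod ((i : Int) + x) (bits.length : Int)).toNat =
      ((PySem.Int.mod x (bits.length : Int)).toNat + i) % bits.length := by
  have hnI : (0:Int) < (bits.length : Int) := by exact_mod_cast hn
  rw [PySem.Int.mod_eq_emod_of_pos hnI, PySem.Int.mod_eq_emod_of_pos hnI]
  have h0 : 0 ≤ x % (bits.length : Int) := Int.emod_nonneg x (by omega)
  have h1 : x % (bits.length : Int) < (bits.length : Int) := Int.emod_lt_of_pos x hnI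
  have hcast : x % (bits.length : Int) = (((x % (bits.length : Int)).toNat : Nat) : Int) :=
    (Int.toNat_of_nonneg h0).symm
  have hmain : ((i : Int) + x) % (bits.length : Int) =
      (((((x % (bits.length : Int)).toNat + i) % bits.length : Nat)) : Int) := by
    conv_lhs => rw [Int.add_emod (i : Int) x, hcast,
      Int.emod_eq_of_lt (Int.natCast_nonneg i) (by exact_mod_cast hi : ((i : Int) < (bits.length : Int)))]
    rw [Int.natCast_mod]
    push_cast
    congr 1
    omega
  rw [hmain, Int.toNat_natCast]

theorem stepB_length (bits polynomial : List Int) (acc : List Int) (jp : Int × Int)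
    (hacc : acc.length = bits.length) (hb : bits ≠ []) :
    (pvStepB bits polynomial acc jp).length = bits.length := by
  unfold pvStepB
  by_cases hp : jp.2 = 0
  · simp [hp, hacc]
  · have hn : 0 < bits.length := List.length_pos_of_ne_nil hb
    have hnI : (0:Int) < (bits.length : Int) := by exact_mod_cast hn
    rw [if_neg hp]
    have h0 : 0 ≤ PySem.Int.mod (jp.1 - ((polynomial.length : Int) - 1)) (bits.length : Int) :=
      PySem.Int.mod_nonneg _ hnI
    have h1 : PySem.Int.mod (jp.1 - ((polynomial.length : Int) - 1)) (bits.length : Int) <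
        (bits.length : Int) := PySem.Int.mod_lt _ hnI
    simp only [List.length_map, List.length_zip, pvRot,
      PySem.List.slice_from bits h0, PySem.List.slice_to bits h0,
      List.length_append, List.length_drop, List.length_take, hacc]
    omega

theorem stepB_getD (bits polynomial : List Int) (acc : List Int) (jp : Int × Int)
    (hacc : acc.length = bits.length) (hb : bits ≠ []) (i : Nat) (hi : i < bits.length) :
    (pvStepB bits polynomial acc jp).getD i 0 =
      pvTapScalar bits polynomial i (acc.getD i 0) jp := by
  unfold pvStepB pvTapScalar
  by_cases hp : jp.2 = 0
  · simp [hp]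
  · have hn : 0 < bits.length := List.length_pos_of_ne_nil hb
    have hnI : (0:Int) < (bits.length : Int) := by exact_mod_cast hn
    rw [if_neg hp, if_neg hp]
    have h0 : 0 ≤ PySem.Int.mod (jp.1 - ((polynomial.length : Int) - 1)) (bits.length : Int) :=
      PySem.Int.mod_nonneg _ hnI
    have h1 : PySem.Int.mod (jp.1 - ((polynomial.length : Int) - 1)) (bits.length : Int) <
        (bits.length : Int) := PySem.Int.mod_lt _ hnI
    have hrot : pvRot bits (PySem.Int.mod (jp.1 - ((polynomial.length : Int) - 1)) (bits.length : Int)) =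
        bits.drop (PySem.Int.mod (jp.1 - ((polynomial.length : Int) - 1)) (bits.length : Int)).toNat ++
          bits.take (PySem.Int.mod (jp.1 - ((polynomial.length : Int) - 1)) (bits.length : Int)).toNat := by
      unfold pvRot
      rw [PySem.List.slice_from bits h0, PySem.List.slice_to bits h0]
    have hrlen : (pvRot bits (PySem.Int.mod (jp.1 - ((polynomial.length : Int) - 1)) (bits.length : Int))).length = bits.length := by
      rw [hrot]
      simp only [List.length_append, List.length_drop, List.length_take]
      omega
    rw [List.getD_eq_getElem _ _ (by simp [hrlen, hacc]; omega), List.getElem_map,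
      List.getElem_zip, List.getD_eq_getElem acc _ (by omega)]
    dsimp only
    have hofft : (PySem.Int.mod (jp.1 - ((polynomial.length : Int) - 1)) (bits.length : Int)).toNat ≤ bits.length := by omega
    have hrv := rot_getD bits (PySem.Int.mod (jp.1 - ((polynomial.length : Int) - 1)) (bits.length : Int)).toNat i hofft hi
    have harg : (i : Int) + jp.1 - ((polynomial.length : Int) - 1) =
        (i : Int) + (jp.1 - ((polynomial.length : Int) - 1)) := by ring
    congr 1
    congr 1
    rw [harg, idx_eq bits hn _ i hi, ← hrv, ← hrot,
      List.getD_eq_getElem _ _ (by rw [hrlen]; omega)]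

-- elementwise value of B's fold
theorem foldB_getD (bits polynomial : List Int) (hb : bits ≠ []) :
    ∀ (L : List (Int × Int)) (acc : List Int), acc.length = bits.length →
      (L.foldl (pvStepB bits polynomial) acc).length = bits.length ∧
      ∀ i, i < bits.length →
        (L.foldl (pvStepB bits polynomial) acc).getD i 0 =
          L.foldl (pvTapScalar bits polynomial i) (acc.getD i 0) := by
  intro L
  induction L with
  | nil => intro acc hacc; exact ⟨hacc, fun i _ => rfl⟩
  | cons jp L ih =>
      intro acc hacc
      simp only [List.foldl_cons]
      have hstep := stepB_length bits polynomial acc jp hacc hb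
      obtain ⟨hlen, hval⟩ := ih _ hstep
      refine ⟨hlen, fun i hi => ?_⟩
      rw [hval i hi, stepB_getD bits polynomial acc jp hacc hb i hi]

-- B in map form (bits nonempty)
theorem portB_eq_map (bits polynomial : List Int) (hb : bits ≠ []) :
    convolutional_encode_py_alt bits polynomial =
      (List.range bits.length).map
        (fun i => (List.range polynomial.length).foldl
          (fun parity j => PySem.Int.bxor parity (pvTermB bits polynomial i j)) 0) := by
  unfold convolutional_encode_py_alt
  rw [if_neg hb]
  obtain ⟨hlen, hval⟩ := foldB_getD bits polynomial hb (PySem.List.enumerate polynomial)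
    (List.replicate bits.length 0) (by simp)
  apply List.ext_getElem (by simp [hlen])
  intro i h1 h2
  have hi : i < bits.length := by rw [hlen] at h1; exact h1
  rw [List.getElem_map, List.getElem_range, ← List.getD_eq_getElem _ 0 h1, hval i hi]
  rw [List.getD_eq_getElem _ _ (by simpa using hi), List.getElem_replicate]
  rw [PySem.List.enumerate_eq_map_pyRange polynomial 0, List.foldl_map]
  rw [show PySem.List.len polynomial = ((polynomial.length : Nat) : Int) from rfl]
  rw [PySem.List.pyRange_zero_natCast, List.foldl_map]
  apply PySem.List.foldl_congr_mem
  intro a j hj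
  rw [List.mem_range] at hj
  unfold pvTapScalar pvTermB
  by_cases hp : PySem.List.pyGetD polynomial ((j : Nat) : Int) 0 = 0
  · simp [hp, PySem.Int.bxor_zero]
  · rw [if_neg hp]
    have hn : 0 < bits.length := List.length_pos_of_ne_nil hb
    have hnI : (0:Int) < (bits.length : Int) := by exact_mod_cast hn
    congr 2
    exact (pyGetD_int_eq_getD bits _ (PySem.Int.mod_nonneg _ hnI)
      (by exact_mod_cast PySem.Int.mod_lt _ hnI)).symm

-- A's term equals the modular term, under Pre_.
theorem term_eq (bits polynomial : List Int)
    (hPre : polynomial.length ≤ bits.length + 1)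
    (i j : Nat) (hi : i < bits.length) (hj : j < polynomial.length) :
    pvTermA bits polynomial i j = pvTermB bits polynomial i j := by
  unfold pvTermA pvTermB pvFull
  congr 1
  have hn : 0 < bits.length := by omega
  have hnI : (0:Int) < (bits.length : Int) := by exact_mod_cast hn
  rw [PySem.Int.mod_eq_emod_of_pos hnI]
  rcases Nat.lt_or_ge 1 polynomial.length with hk2 | hk1
  · have ht : 0 < polynomial.length - 1 := by omega
    have hcast : -((polynomial.length : Int) - 1) = -(((polynomial.length - 1 : Nat)) : Int) := by
      push_cast [Nat.cast_sub (by omega : 1 ≤ polynomial.length)]; ring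
    rw [hcast, PySem.List.slice_from_neg_natCast bits (polynomial.length - 1) ht]
    have hdl : (bits.drop (bits.length - (polynomial.length - 1))).length = polynomial.length - 1 := by
      rw [List.length_drop]; omega
    have hc : ((i:Int)+(j:Int)) = (((i+j:Nat)):Int) := by push_cast; ring
    rw [hc, PySem.List.pyGetD_natCast]
    have hwrap : ∀ x : Int, (x + (bits.length : Int)) % (bits.length : Int) = x % (bits.length : Int) := by
      intro x
      have h := Int.add_mul_emod_self_left (a := x) (b := (bits.length : Int)) (c := 1)
      rw [mul_one] at h
      exact h
    rcases Nat.lt_or_ge (i + j) (polynomial.length - 1) with hcase | hcase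
    · have hmod : ((((i+j:Nat)):Int) - ((polynomial.length : Int) - 1)) % (bits.length : Int)
          = (((i+j:Nat)):Int) - ((polynomial.length : Int) - 1) + (bits.length : Int) := by
        rw [← hwrap]
        exact Int.emod_eq_of_lt (by push_cast; omega) (by push_cast; omega)
      rw [hmod, pyGetD_int_eq_getD bits _ (by push_cast; omega) (by push_cast; omega)]
      rw [List.getD_eq_getElem?_getD, List.getD_eq_getElem?_getD,
        List.getElem?_append_left (by omega), List.getElem?_drop]
      congr 2
      have : ((((i+j:Nat)):Int) - ((polynomial.length : Int) - 1) + (bits.length : Int)).toNat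
          = bits.length - (polynomial.length - 1) + (i + j) := by
        push_cast
        omega
      omega
    · have hmod : ((((i+j:Nat)):Int) - ((polynomial.length : Int) - 1)) % (bits.length : Int)
          = (((i+j:Nat)):Int) - ((polynomial.length : Int) - 1) :=
        Int.emod_eq_of_lt (by push_cast; omega) (by push_cast; omega)
      rw [hmod, pyGetD_int_eq_getD bits _ (by push_cast; omega) (by push_cast; omega)]
      rw [List.getD_eq_getElem?_getD, List.getD_eq_getElem?_getD,
        List.getElem?_append_right (by omega)]
      have hidx : (i + j) - (List.drop (bits.length - (polynomial.length - 1)) bits).length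
          = ((((i+j:Nat)):Int) - ((polynomial.length : Int) - 1)).toNat := by
        rw [hdl]
        push_cast
        omega
      rw [hidx]
  · have hk : polynomial.length = 1 := by omega
    have hj0 : j = 0 := by omega
    subst hj0
    rw [show -((polynomial.length : Int) - 1) = 0 from by rw [hk]; ring]
    rw [PySem.List.slice_from bits (le_refl 0)]
    simp only [Int.toNat_zero, List.drop_zero]
    have hmod : ((i:Int) + ((0:Nat):Int) - ((polynomial.length : Int) - 1)) % (bits.length : Int)
        = (i:Int) := by
      rw [hk]
      push_cast
      rw [show (i:Int) + 0 - 0 = (i:Int) from by ring]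
      exact Int.emod_eq_of_lt (by omega) (by exact_mod_cast hi)
    rw [hmod, pyGetD_int_eq_getD bits _ (by omega) (by exact_mod_cast hi)]
    have hc : ((i:Int)+((0:Nat):Int)) = ((i:Nat):Int) := by push_cast; ring
    rw [hc, PySem.List.pyGetD_natCast]
    rw [List.getD_eq_getElem?_getD, List.getD_eq_getElem?_getD,
      List.getElem?_append_left (by omega)]
    simp

-- ===== VERDICT (by name: the statement is the Claim_ definition above) =====
theorem convolutional_encode_py_spec : Claim_equal_convolutional_encode_py := by
  intro bits polynomial _ hPre
  unfold Spec_convolutional_encode_py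
  by_cases hb : bits = []
  · subst hb
    simp [convolutional_encode_py, convolutional_encode_py_alt]
  · rw [portA_eq_map, portB_eq_map bits polynomial hb]
    rcases hPre with hnil | hle
    · exact absurd hnil hb
    · apply List.map_congr_left
      intro i hi
      rw [List.mem_range] at hi
      apply PySem.List.foldl_congr_mem
      intro acc j hjmem
      rw [List.mem_range] at hjmem
      rw [term_eq bits polynomial hle i j hi hjmem]
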